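-- pv_equiv track=rewrite | github.com/alecmori/project_euler_answers | answers/problem_35/run_problem.py | _get_numbers_only_odd
-- ===== SOURCE A (Python) =====
-- def _get_numbers_only_odd(upper_bound):
--     # TODO: Use some local_vars_constructor for generator and this
--     generator_vars = {
--         'current_count': 1,
--         'current_n': 1,
--         'current_threshold': 5,
--         'multiplier': 2,
--         'thresholds_met': {},
--     }
--     return_value = set()
--     while generator_vars['current_n'] <= upper_bound:
--         return_value.add(generator_vars['current_n'])
--         # TODO: Reuse a lot of this logic between this and generator
--         generator_vars['current_n'] += 2
--         for threshold, additive in generator_vars['thresholds_met'].items():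
--             if generator_vars['current_count'] % threshold == 0:
--                 generator_vars['current_n'] += additive
--         current_threshold = generator_vars['current_threshold']
--         if generator_vars['current_count'] == current_threshold:
--             generator_vars['current_count'] -= current_threshold
--             generator_vars['thresholds_met'][current_threshold] = (
--                 current_threshold * generator_vars['multiplier']
--             )
--             generator_vars['multiplier'] *= 2
--             generator_vars['current_threshold'] *= 5
--         generator_vars['current_count'] += 1
--     return return_value
-- ===== SOURCE B (Python) =====
-- def _encode(i):
--     # i written in bijective base-5 (digits 1..5), each digit mapped to the odd digit 2*d-1
--     if i < 1:
--         return 0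
--     q, r = divmod(i - 1, 5)
--     return _encode(q) * 10 + 2 * r + 1
--
--
-- def _get_numbers_only_odd(upper_bound):
--     return_value = set()
--     i = 1
--     while True:
--         n = _encode(i)
--         if n > upper_bound:
--             break
--         return_value.add(n)
--         i += 1
--     return return_value
-- ===== Notes on version B (the rewrite author's own statement) =====
-- stated objective: alternative
-- what changed: Replaces A's incremental counter/threshold-dict carry state machine with a direct per-index computation: the i-th all-odd-digit number is i written in bijective base-5 with digit d mapped to the odd digit 2d-1.
import Mathlib
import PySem

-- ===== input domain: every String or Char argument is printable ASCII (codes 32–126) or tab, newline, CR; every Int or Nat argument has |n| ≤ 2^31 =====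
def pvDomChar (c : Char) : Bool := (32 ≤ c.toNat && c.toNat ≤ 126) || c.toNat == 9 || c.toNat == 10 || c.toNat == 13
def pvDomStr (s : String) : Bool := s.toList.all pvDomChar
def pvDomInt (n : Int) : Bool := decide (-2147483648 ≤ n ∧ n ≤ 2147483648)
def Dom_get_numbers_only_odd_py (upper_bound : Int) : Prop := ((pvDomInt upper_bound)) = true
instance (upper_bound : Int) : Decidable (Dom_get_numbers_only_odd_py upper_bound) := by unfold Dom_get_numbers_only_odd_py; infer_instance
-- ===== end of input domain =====

-- B replaces A's incremental counter/threshold-dict carry machine by computing each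
-- all-odd-digit number directly from its index (bijective base-5, digit d mapped to 2d-1);
-- objective: alternative (no speed claim).

-- ===== PORT A =====
-- A's generator_vars dict of local state is ported as the five separate loop-state
-- arguments (current_count, current_n, current_threshold, multiplier, thresholds_met);
-- the returned set is built with PySem.Set.add exactly as return_value.add(...).
-- The while loop is ported with a fuel argument (a totality device only: the loop body
-- runs exactly as in Python, and (upper_bound+2).toNat steps are proved sufficient).
def pyLoopA (ub : Int) : Nat → Int → Int → Int → Int → PySem.Dict Int Int → PySem.Set Int → List Int
  | 0, _, _, _, _, _, acc => acc
  | fuel+1, c, n, t, m, d, acc =>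
    if n ≤ ub then
      let acc' := PySem.Set.add acc n
      let n1 := n + 2
      let n2 := d.items.foldl (fun nn p => if PySem.Int.mod c p.1 = 0 then nn + p.2 else nn) n1
      if c = t then
        pyLoopA ub fuel (c - t + 1) n2 (t * 5) (m * 2) (d.insert t (t * m)) acc'
      else
        pyLoopA ub fuel (c + 1) n2 t m d acc'
    else acc

def get_numbers_only_odd_py (upper_bound : Int) : List Int :=
  pyLoopA upper_bound (upper_bound + 2).toNat 1 1 5 2 PySem.Dict.empty PySem.Set.empty

-- ===== PORT B =====
-- _encode's recursion is ported with fuel i.toNat (a totality device: the recursion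
-- argument (i-1)//5 is strictly smaller, so i.toNat steps always suffice).
def pyEncodeGo : Nat → Int → Int
  | 0, _ => 0
  | fuel+1, i =>
    if i < 1 then 0
    else pyEncodeGo fuel (PySem.Int.floordiv (i - 1) 5) * 10 + 2 * PySem.Int.mod (i - 1) 5 + 1

def pyEncode (i : Int) : Int := pyEncodeGo i.toNat i

-- B's while-True loop, fuel as for A.
def pyLoopB (ub : Int) : Nat → Int → PySem.Set Int → List Int
  | 0, _, acc => acc
  | fuel+1, i, acc =>
    let n := pyEncode i
    if n > ub then acc
    else pyLoopB ub fuel (i + 1) (PySem.Set.add acc n)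

def get_numbers_only_odd_py_alt (upper_bound : Int) : List Int :=
  pyLoopB upper_bound (upper_bound + 2).toNat 1 PySem.Set.empty

-- ===== PRECONDITION & SPEC =====
def Spec_get_numbers_only_odd_py (upper_bound : Int) (out : List Int) : Prop := out = get_numbers_only_odd_py_alt upper_bound
instance (upper_bound : Int) (out : List Int) : Decidable (Spec_get_numbers_only_odd_py upper_bound out) := by unfold Spec_get_numbers_only_odd_py; infer_instance

-- ===== CLAIM (what is proved, stated in full; the proofs are below) =====
def Claim_equal_get_numbers_only_odd_py : Prop := ∀ (upper_bound : Int), Dom_get_numbers_only_odd_py upper_bound → Spec_get_numbers_only_odd_py upper_bound (get_numbers_only_odd_py upper_bound)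

-- ===== LEMMAS AND PROOFS =====

-- obb j = pyEncode j on natural indices: the j-th all-odd-digit number (obb 0 = 0)
def obb (j : Nat) : Int := pyEncode (j : Int)

lemma pyEncodeGo_congr : ∀ (f₁ f₂ : Nat) (i : Int), i.toNat ≤ f₁ → i.toNat ≤ f₂ →
    pyEncodeGo f₁ i = pyEncodeGo f₂ i := by
  intro f₁
  induction f₁ with
  | zero =>
    intro f₂ i h1 _
    have hi : i ≤ 0 := by omega
    cases f₂ with
    | zero => rfl
    | succ g => simp [pyEncodeGo, show i < 1 by omega]
  | succ f ih =>
    intro f₂ i h1 h2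
    cases f₂ with
    | zero =>
      have hi : i ≤ 0 := by omega
      simp [pyEncodeGo, show i < 1 by omega]
    | succ g =>
      by_cases hi : i < 1
      · simp [pyEncodeGo, hi]
      · have hpos : 1 ≤ i := by omega
        have hfd : PySem.Int.floordiv (i - 1) 5 = (i - 1) / 5 :=
          PySem.Int.floordiv_eq_ediv_of_pos (by omega)
        have hlt : ((i - 1) / 5).toNat < i.toNat := by omega
        simp only [pyEncodeGo, if_neg (by omega : ¬ i < 1), hfd]
        rw [ih g ((i-1)/5) (by omega) (by omega)]

lemma obb_succ (n : Nat) : obb (n + 1) = obb (n / 5) * 10 + 2 * (n % 5 : Nat) + 1 := by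
  have h1 : ((n:Int) + 1).toNat = n + 1 := by omega
  show pyEncodeGo ((n:Int)+1).toNat ((n:Int)+1) = _
  rw [h1]
  simp only [pyEncodeGo, if_neg (by omega : ¬ ((n:Int)+1) < 1)]
  have : ((n:Int) + 1 - 1) = (n:Int) := by ring
  rw [this]
  have hfd : PySem.Int.floordiv (n:Int) (5:Int) = ((n / 5 : Nat) : Int) := by
    exact_mod_cast PySem.Int.floordiv_natCast n 5
  have hmd : PySem.Int.mod (n:Int) (5:Int) = ((n % 5 : Nat) : Int) := by
    exact_mod_cast PySem.Int.mod_natCast n 5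
  rw [hfd, hmd]
  have hrec : pyEncodeGo n ((n/5 : Nat):Int) = obb (n / 5) :=
    pyEncodeGo_congr _ _ _ (by omega) (by omega)
  rw [hrec]

lemma obb_ge (j : Nat) : (j : Int) ≤ obb j := by
  induction j using Nat.strong_induction_on with
  | _ j ih =>
    match j with
    | 0 => simp [obb, pyEncode, pyEncodeGo]
    | n+1 =>
      rw [obb_succ]
      have h5 := ih (n / 5) (by omega)
      have := Nat.div_add_mod n 5
      push_cast
      omega
def T : Nat → Nat
  | 0 => 0
  | K+1 => 5 * T K + 5
def S (c : Int) : Nat → Int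
  | 0 => 0
  | K+1 => S c K + (if (5:Int)^(K+1) ∣ c then (10:Int)^(K+1) else 0)
def dictK (K : Nat) : List (Int × Int) := (List.range K).map (fun k => ((5:Int)^(k+1), (10:Int)^(k+1)))

lemma T_succ_eq (K : Nat) : T (K + 1) = T K + 5^(K+1) := by
  induction K with
  | zero => rfl
  | succ K ih =>
    show 5 * T (K+1) + 5 = (5 * T K + 5) + 5^(K+2)
    rw [ih]; ring

lemma S_nonneg (c : Int) (K : Nat) : 0 ≤ S c K := by
  induction K with
  | zero => simp [S]
  | succ K ih =>
    simp only [S]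
    have : (0:Int) ≤ (if (5:Int)^(K+1) ∣ c then (10:Int)^(K+1) else 0) := by positivity
    omega

lemma S_mul5 (d : Int) (K : Nat) : S (5 * d) (K + 1) = 10 + 10 * S d K := by
  induction K with
  | zero =>
    simp [S, show ((5:Int) ∣ 5 * d) from ⟨d, rfl⟩]
  | succ K ih =>
    show S (5*d) (K+1) + _ = 10 + 10 * (S d K + _)
    rw [ih]
    have hdvd : ((5:Int)^(K+2) ∣ 5 * d) ↔ ((5:Int)^(K+1) ∣ d) := by
      rw [pow_succ' (5:Int)]
      exact mul_dvd_mul_iff_left (by norm_num)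
    by_cases h : (5:Int)^(K+1) ∣ d
    · rw [if_pos (hdvd.mpr h), if_pos h]; ring
    · rw [if_neg (fun hh => h (hdvd.mp hh)), if_neg h]; ring

lemma fold_dictK (K : Nat) (c n : Int) :
    (dictK K).foldl (fun nn p => if PySem.Int.mod c p.1 = 0 then nn + p.2 else nn) n = n + S c K := by
  induction K generalizing n with
  | zero => simp [dictK, S]
  | succ K ih =>
    rw [dictK, List.range_succ, List.map_append, List.foldl_append]
    have ih' := ih n
    simp only [dictK] at ih'
    rw [ih']
    simp only [List.map_cons, List.map_nil, List.foldl_cons, List.foldl_nil, S]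
    simp only [PySem.Int.mod_eq_zero_iff_dvd]
    split_ifs with h <;> ring

lemma exists_K (j : Nat) (hj : 1 ≤ j) : ∃ K, T K < j ∧ j ≤ T (K + 1) := by
  induction j with
  | zero => omega
  | succ j ih =>
    by_cases hj1 : 1 ≤ j
    · obtain ⟨K, h1, h2⟩ := ih hj1
      by_cases h : j + 1 ≤ T (K + 1)
      · exact ⟨K, by omega, h⟩
      · refine ⟨K + 1, by omega, ?_⟩
        show j + 1 ≤ 5 * T (K+1) + 5
        omega
    · have hj0 : j = 0 := by omega
      exact ⟨0, by simp [T, hj0], by show j + 1 ≤ 5 * T 0 + 5; simp [T, hj0]⟩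

lemma T_mod5 (K : Nat) : T K % 5 = 0 := by
  cases K with
  | zero => rfl
  | succ K => show (5 * T K + 5) % 5 = 0; omega

lemma S_eq_zero (c : Int) (K : Nat) (h : ¬ (5:Int) ∣ c) : S c K = 0 := by
  induction K with
  | zero => rfl
  | succ K ih =>
    simp only [S, ih]
    rw [if_neg, add_zero]
    intro hd
    exact h (dvd_trans (dvd_pow_self 5 (by omega)) hd)

lemma obb_step (K : Nat) : ∀ (j : Nat), T K < j → j ≤ T (K + 1) →
    obb (j + 1) = obb j + 2 + S ((j : Int) - (T K : Int)) K := by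
  induction K with
  | zero =>
    intro j h1 h2
    have h5 : T 1 = 5 := rfl
    have h0 : T 0 = 0 := rfl
    rw [h5] at h2
    rw [h0] at h1
    interval_cases j <;> decide
  | succ K ih =>
    intro j h1 h2
    have hT1 : T (K+1) % 5 = 0 := T_mod5 _
    have hT2 : T (K+1+1) = 5 * T (K+1) + 5 := rfl
    have hTK : T (K+1) = 5 * T K + 5 := rfl
    have hj1 : 1 ≤ j := by omega
    by_cases h5 : j % 5 = 0
    · -- carry case: j = 5*(q+1)
      set q := j / 5 - 1 with hq
      have hjq : j = 5 * (q + 1) := by omega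
      have hq1 : T K < q := by omega
      have hq2 : q ≤ T (K + 1) := by omega
      have hIH := ih q hq1 hq2
      have hoj : obb j = obb q * 10 + 9 := by
        conv_lhs => rw [show j = (j - 1) + 1 by omega]
        rw [obb_succ]
        have e1 : (j - 1) / 5 = q := by omega
        have e2 : (j - 1) % 5 = 4 := by omega
        rw [e1, e2]; omega
      have hoj1 : obb (j + 1) = obb (q + 1) * 10 + 1 := by
        rw [obb_succ]
        have e1 : j / 5 = q + 1 := by omega
        rw [e1, h5]; norm_num
      have hS : ((j:Int) - (T (K+1) : Int)) = 5 * ((q:Int) - (T K : Int)) := by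
        rw [hTK]; push_cast [hjq]; ring
      rw [hS, S_mul5, hoj, hoj1, hIH]
      ring
    · -- no carry: increment the last digit by 2
      have hoj : obb j = obb (j / 5) * 10 + 2 * ((j % 5 : Nat) : Int) - 2 + 1 := by
        conv_lhs => rw [show j = (j - 1) + 1 by omega]
        rw [obb_succ]
        have e1 : (j - 1) / 5 = j / 5 := by omega
        have e2 : (j - 1) % 5 = j % 5 - 1 := by omega
        rw [e1, e2]
        have e3 : ((j % 5 - 1 : Nat) : Int) = ((j % 5 : Nat) : Int) - 1 := by
          have : 1 ≤ j % 5 := by omega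
          omega
        rw [e3]; ring
      have hS : S ((j:Int) - (T (K+1) : Int)) (K+1) = 0 := by
        apply S_eq_zero
        intro ⟨d, hd⟩
        have h5T : ((T (K+1) : Nat) : Int) % 5 = 0 := by omega
        have : (j : Int) % 5 = 0 := by omega
        omega
      rw [hS, obb_succ, hoj]
      ring
    
lemma obb_lt_succ (j : Nat) (hj : 1 ≤ j) : obb j < obb (j + 1) := by
  obtain ⟨K, h1, h2⟩ := exists_K j hj
  rw [obb_step K j h1 h2]
  have := S_nonneg ((j:Int) - (T K : Int)) K
  omega

def rest (ub : Int) (j : Nat) : List Int :=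
  if obb j ≤ ub then obb j :: rest ub (j + 1) else []
termination_by (ub + 1 - j).toNat
decreasing_by
  have := obb_ge j
  omega

lemma loopB_eq (ub : Int) : ∀ (fuel : Nat) (j : Nat) (acc : PySem.Set Int),
    1 ≤ j → (∀ x ∈ acc, x < obb j) →
    ((ub + 1 - (j : Int)).toNat < fuel ∨ ub < obb j) →
    pyLoopB ub fuel (j : Int) acc = acc ++ rest ub j := by
  intro fuel
  induction fuel with
  | zero =>
    intro j acc hj hacc hf
    have hub : ub < obb j := by omega
    rw [rest, if_neg (by omega)]
    simp [pyLoopB]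
  | succ fuel ih =>
    intro j acc hj hacc hf
    rw [pyLoopB, rest]
    show (if pyEncode (j:Int) > ub then acc else _) = _
    have hobb : pyEncode (j : Int) = obb j := rfl
    rw [hobb]
    by_cases hle : obb j ≤ ub
    · rw [if_neg (by omega), if_pos hle]
      have hnm : obb j ∉ acc := fun hm => absurd (hacc _ hm) (by omega)
      have hadd : PySem.Set.add acc (obb j) = acc ++ [obb j] := PySem.Set.add_of_not_mem hnm
      have hcast : (j : Int) + 1 = ((j + 1 : Nat) : Int) := by push_cast; ring
      rw [hadd, hcast, ih (j + 1) (acc ++ [obb j]) (by omega) ?_ ?_]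
      · simp
      · intro x hx
        rcases List.mem_append.mp hx with h | h
        · exact lt_trans (hacc _ h) (obb_lt_succ j hj)
        · simp at h; subst h; exact obb_lt_succ j hj
      · have := obb_ge j
        omega
    · rw [if_pos (by omega), if_neg hle]
      simp

lemma dict_insert_fresh (K : Nat) :
    (PySem.Dict.mk (dictK K)).insert ((5:Int)^(K+1)) ((5:Int)^(K+1) * (2:Int)^(K+1)) = PySem.Dict.mk (dictK (K+1)) := by
  have hcont : (PySem.Dict.mk (dictK K)).contains ((5:Int)^(K+1)) = false := by
    simp [PySem.Dict.contains, dictK]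
    intro a hlt heq
    omega
  rw [PySem.Dict.insert, if_neg (by simp [hcont])]
  have hval : (5:Int)^(K+1) * (2:Int)^(K+1) = (10:Int)^(K+1) := by
    rw [← mul_pow]; norm_num
  simp only [hval]
  congr 1
  rw [dictK, dictK, List.range_succ, List.map_append]
  rfl

lemma loopA_eq (ub : Int) : ∀ (fuel : Nat) (j K : Nat) (acc : PySem.Set Int),
    1 ≤ j → T K < j → j ≤ T (K + 1) →
    (∀ x ∈ acc, x < obb j) →
    ((ub + 1 - (j : Int)).toNat < fuel ∨ ub < obb j) →
    pyLoopA ub fuel ((j : Int) - (T K : Int)) (obb j) (5^(K+1)) (2^(K+1)) (PySem.Dict.mk (dictK K)) acc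
      = acc ++ rest ub j := by
  intro fuel
  induction fuel with
  | zero =>
    intro j K acc hj hK1 hK2 hacc hf
    have hub : ub < obb j := by omega
    rw [rest, if_neg (by omega)]
    simp [pyLoopA]
  | succ fuel ih =>
    intro j K acc hj hK1 hK2 hacc hf
    rw [pyLoopA, rest]
    by_cases hle : obb j ≤ ub
    · rw [if_pos hle, if_pos hle]
      have hnm : obb j ∉ acc := fun hm => absurd (hacc _ hm) (by omega)
      have hadd : PySem.Set.add acc (obb j) = acc ++ [obb j] := PySem.Set.add_of_not_mem hnm
      have hn2 : (PySem.Dict.mk (dictK K)).items.foldl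
          (fun nn p => if PySem.Int.mod ((j : Int) - (T K : Int)) p.1 = 0 then nn + p.2 else nn) (obb j + 2)
          = obb (j + 1) := by
        show (dictK K).foldl _ _ = _
        rw [fold_dictK, obb_step K j hK1 hK2]
      have hacc' : ∀ x ∈ acc ++ [obb j], x < obb (j + 1) := by
        intro x hx
        rcases List.mem_append.mp hx with h | h
        · exact lt_trans (hacc _ h) (obb_lt_succ j hj)
        · simp at h; subst h; exact obb_lt_succ j hj
      have hfuel' : ((ub + 1 - ((j + 1 : Nat) : Int)).toNat < fuel ∨ ub < obb (j + 1)) := by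
        have := obb_ge j
        left; push_cast; omega
      have hTsucc : (T (K+1) : Int) = (T K : Int) + (5:Int)^(K+1) := by
        have := T_succ_eq K
        push_cast [this]
        ring
      by_cases hcr : j = T (K + 1)
      · -- threshold reached: the dict gains 5^(K+1) and count resets
        have hceq : (j : Int) - (T K : Int) = (5:Int)^(K+1) := by
          rw [hcr, hTsucc]; ring
        rw [if_pos (by exact_mod_cast hceq), hadd, hn2]
        have e1 : (j : Int) - (T K : Int) - (5:Int)^(K+1) + 1 = ((j + 1 : Nat) : Int) - (T (K+1) : Int) := by
          rw [hTsucc]; push_cast; ring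
        have e2 : (5:Int)^(K+1) * 5 = 5^(K+1+1) := by ring
        have e3 : (2:Int)^(K+1) * 2 = 2^(K+1+1) := by ring
        rw [e1, e2, e3, dict_insert_fresh]
        rw [ih (j+1) (K+1) _ (by omega) (by omega)
          (by have hT : T (K+1+1) = 5 * T (K+1) + 5 := rfl; omega) hacc' hfuel']
        simp
      · -- count below threshold
        have hcne : (j : Int) - (T K : Int) ≠ (5:Int)^(K+1) := by
          intro h
          apply hcr
          have : (j : Int) = (T (K+1) : Int) := by rw [hTsucc]; omega
          exact_mod_cast this
        rw [if_neg (by exact_mod_cast hcne), hadd, hn2]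
        have e1 : (j : Int) - (T K : Int) + 1 = ((j + 1 : Nat) : Int) - (T K : Int) := by push_cast; ring
        rw [e1, ih (j+1) K _ (by omega) (by omega) (by omega) hacc' hfuel']
        simp
    · rw [if_neg hle, if_neg hle]
      simp


-- ===== VERDICT (by name: the statement is the Claim_ definition above) =====
theorem get_numbers_only_odd_py_spec : Claim_equal_get_numbers_only_odd_py := by
  intro ub _
  unfold Spec_get_numbers_only_odd_py get_numbers_only_odd_py get_numbers_only_odd_py_alt
  have hobb1 : obb 1 = 1 := rfl
  have hfuel : ((ub + 1 - ((1 : Nat) : Int)).toNat < (ub + 2).toNat ∨ ub < obb 1) := by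
    rw [hobb1]; omega
  have hempty : ∀ x ∈ (PySem.Set.empty : PySem.Set Int), x < obb 1 := by
    intro x hx; simp [PySem.Set.empty] at hx
  have hA := loopA_eq ub (ub + 2).toNat 1 0 PySem.Set.empty (le_refl 1) (by decide) (by decide)
    hempty hfuel
  have hB := loopB_eq ub (ub + 2).toNat 1 PySem.Set.empty (le_refl 1) hempty hfuel
  have e1 : ((1 : Nat) : Int) - ((T 0 : Nat) : Int) = 1 := by norm_num [T]
  have e2 : ((1 : Nat) : Int) = (1 : Int) := by norm_num
  have e3 : (5 : Int)^(0+1) = 5 := by norm_num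
  have e4 : (2 : Int)^(0+1) = 2 := by norm_num
  have e5 : PySem.Dict.mk (dictK 0) = (PySem.Dict.empty : PySem.Dict Int Int) := rfl
  rw [e1, hobb1, e3, e4, e5] at hA
  rw [e2] at hB
  rw [hA, hB]
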